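-- pv_equiv track=rewrite | github.com/premanandgit/eubix | routemaster/copydownroutefiles.py | calculate_checksum
-- ===== SOURCE A (Python) =====
-- def calculate_checksum(panelId, text):
--     etx = "0x03"
--     formatted_text = r'' + text
--     formatted_text = f"{panelId}{formatted_text}" + chr(int(etx, 16))
--     hex_value =  formatted_text.encode().hex()
--     sum_value = 0
--     for i in range(0, len(hex_value), 2):
--         hex_pair = hex_value[i:i+2]
--         hex_number = int(hex_pair, 16)  # Rename the variable to avoid confusion
--         sum_value += hex_number
--     modulus_value = 0 - (sum_value % 256)
--     if modulus_value < 0: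
--         binary_value = format(modulus_value & 0xFFFF, '016b')
--     else:
--         binary_value = format(modulus_value, '016b')
--     last_8_bits = binary_value[-8:]
--     checksum = format(int(last_8_bits, 2), '02X')
--     return chr(0x02) + panelId + text + chr(0x03) + str(checksum)
-- ===== SOURCE B (Python) =====
-- def calculate_checksum(panelId, text):
--     formatted_text = f"{panelId}{text}" + chr(0x03)
--     total = sum(formatted_text.encode())
--     checksum = format((-total) % 256, '02X')
--     return chr(0x02) + panelId + text + chr(0x03) + checksum
-- ===== Notes on version B (the rewrite author's own statement) =====
-- stated objective: simpler
-- what changed: B sums the message bytes directly and takes the checksum as the closed form (-total) % 256 rendered as two upper-case hex digits, replacing A's hex-string construction, pair-by-pair reparse loop and negate/16-bit-binary/slice/reparse block.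
import Mathlib
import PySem

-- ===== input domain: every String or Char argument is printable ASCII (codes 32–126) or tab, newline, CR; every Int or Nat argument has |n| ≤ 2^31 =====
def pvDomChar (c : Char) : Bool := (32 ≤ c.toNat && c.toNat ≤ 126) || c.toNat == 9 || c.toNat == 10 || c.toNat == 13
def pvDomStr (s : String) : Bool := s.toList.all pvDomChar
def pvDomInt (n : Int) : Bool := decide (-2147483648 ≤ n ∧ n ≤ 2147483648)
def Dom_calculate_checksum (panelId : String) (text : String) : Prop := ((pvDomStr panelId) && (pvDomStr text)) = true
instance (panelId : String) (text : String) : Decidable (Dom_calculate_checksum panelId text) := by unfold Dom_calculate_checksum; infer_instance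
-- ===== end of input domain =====

-- B replaces A's hex-string build / pair-reparse loop / 16-bit binary dance by a direct byte
-- sum and the closed form (-total) % 256 printed as two upper-case hex digits (objective: simpler).

-- ===== PORT A =====
-- lower-case hex digit (as produced by bytes.hex())
def pvHexDigitL (n : Nat) : Char := if n < 10 then Char.ofNat (48 + n) else Char.ofNat (87 + n)
-- the two hex chars of one byte
def pvByteHex (b : Nat) : List Char := [pvHexDigitL (b / 16), pvHexDigitL (b % 16)]
-- int(c, 16) for a lower-case hex digit char
def pvHexVal (c : Char) : Int := if 97 ≤ c.toNat then (c.toNat : Int) - 87 else (c.toNat : Int) - 48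
-- for i in range(0, len(hex_value), 2): sum_value += int(hex_value[i:i+2], 16)
-- ported as recursion over successive pairs: the step-2 slices partition hex_value, exact
def pvSumPairs (acc : Int) : List Char → Int
  | [] => acc
  | [c] => acc + pvHexVal c
  | c1 :: c2 :: rest => pvSumPairs (acc + (16 * pvHexVal c1 + pvHexVal c2)) rest
-- format(n, '016b') for n < 2^16 (always the case here)
def pvBin16 (n : Nat) : List Char :=
  (List.range 16).map (fun i => if n / 2 ^ (15 - i) % 2 == 1 then '1' else '0')
-- int(bits, 2)
def pvParseBin (cs : List Char) : Nat := cs.foldl (fun a c => 2 * a + (if c == '1' then 1 else 0)) 0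
-- upper-case hex digit
def pvHexDigitU (n : Nat) : Char := if n < 10 then Char.ofNat (48 + n) else Char.ofNat (55 + n)
-- format(n, '02X') for n < 256 (always the case here)
def pvFmt02X (n : Nat) : String := String.ofList [pvHexDigitU (n / 16), pvHexDigitU (n % 16)]

def calculate_checksum (panelId : String) (text : String) : String :=
  let formatted_text := panelId ++ text ++ String.ofList [Char.ofNat 3]
  -- .encode(): exact on the ASCII domain (one byte per char, equal to its code point)
  let bytes := formatted_text.toList.map (fun c => c.toNat)
  let hex_value := bytes.flatMap pvByteHex
  let sum_value := pvSumPairs 0 hex_value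
  let modulus_value : Int := 0 - PySem.Int.mod sum_value 256
  let binary_value :=
    if modulus_value < 0 then
      -- modulus_value & 0xFFFF: Python's two's-complement AND with 2^16-1 is exactly (mod 2^16)
      pvBin16 (PySem.Int.mod modulus_value 65536).toNat
    else
      pvBin16 modulus_value.toNat
  let last_8_bits := binary_value.drop (binary_value.length - 8)
  let checksum := pvFmt02X (pvParseBin last_8_bits)
  String.ofList [Char.ofNat 2] ++ panelId ++ text ++ String.ofList [Char.ofNat 3] ++ checksum

-- ===== PORT B =====
def calculate_checksum_alt (panelId : String) (text : String) : String :=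
  let formatted_text := panelId ++ text ++ String.ofList [Char.ofNat 3]
  -- sum(formatted_text.encode()): exact on the ASCII domain
  let total : Int := ((formatted_text.toList.map (fun c => c.toNat)).sum : Nat)
  let checksum := pvFmt02X (PySem.Int.mod (0 - total) 256).toNat
  String.ofList [Char.ofNat 2] ++ panelId ++ text ++ String.ofList [Char.ofNat 3] ++ checksum

-- ===== PRECONDITION & SPEC =====
def Spec_calculate_checksum (panelId : String) (text : String) (out : String) : Prop := out = calculate_checksum_alt panelId text
instance (panelId : String) (text : String) (out : String) : Decidable (Spec_calculate_checksum panelId text out) := by unfold Spec_calculate_checksum; infer_instance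

-- ===== CLAIM (what is proved, stated in full; the proofs are below) =====
def Claim_equal_calculate_checksum : Prop := ∀ (panelId : String) (text : String), Dom_calculate_checksum panelId text → Spec_calculate_checksum panelId text (calculate_checksum panelId text)

-- ===== LEMMAS AND PROOFS =====

theorem pvHexVal_digit (n : Nat) (h : n < 16) : pvHexVal (pvHexDigitL n) = (n : Int) := by
  have : ∀ m : Fin 16, pvHexVal (pvHexDigitL m) = (m : Int) := by decide
  exact this ⟨n, h⟩

theorem pvSumPairs_flatMap (bs : List Nat) (acc : Int) (h : ∀ b ∈ bs, b < 256) :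
    pvSumPairs acc (bs.flatMap pvByteHex) = acc + (bs.sum : Int) := by
  induction bs generalizing acc with
  | nil => simp [pvSumPairs]
  | cons b rest ih =>
    have hb : b < 256 := h b (by simp)
    have h1 : b / 16 < 16 := by omega
    have h2 : b % 16 < 16 := by omega
    simp only [List.flatMap_cons, pvByteHex, List.cons_append, List.nil_append, pvSumPairs]
    rw [ih _ (fun x hx => h x (by simp [hx]))]
    rw [pvHexVal_digit _ h1, pvHexVal_digit _ h2]
    simp [List.sum_cons]
    omega

set_option maxRecDepth 100000 in
theorem pvTail_eq : ∀ r : Fin 256,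
    (let mv : Int := 0 - (r : Int);
     let bits := if mv < 0 then pvBin16 (PySem.Int.mod mv 65536).toNat else pvBin16 mv.toNat;
     pvFmt02X (pvParseBin (bits.drop (bits.length - 8))))
    = pvFmt02X (PySem.Int.mod (0 - (r : Int)) 256).toNat := by decide

-- ===== VERDICT (by name: the statement is the Claim_ definition above) =====

theorem calculate_checksum_spec : Claim_equal_calculate_checksum := by
  intro panelId text hdom
  unfold Spec_calculate_checksum
  unfold calculate_checksum calculate_checksum_alt
  simp only []
  have hall : ∀ c ∈ (panelId ++ text ++ String.ofList [Char.ofNat 3]).toList, c.toNat < 256 := by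
    intro c hc
    simp only [Dom_calculate_checksum, Bool.and_eq_true, pvDomStr, List.all_eq_true] at hdom
    rw [String.toList_append, String.toList_append] at hc
    rcases List.mem_append.mp hc with hc' | hc'
    · rcases List.mem_append.mp hc' with hp | ht
      · have := hdom.1 c hp; simp [pvDomChar] at this; omega
      · have := hdom.2 c ht; simp [pvDomChar] at this; omega
    · rw [String.toList_ofList] at hc'
      simp at hc'
      subst hc'
      decide
  set L := (panelId ++ text ++ String.ofList [Char.ofNat 3]).toList with hL
  set S : Nat := (L.map (fun c => c.toNat)).sum with hS
  have hsum : pvSumPairs 0 ((L.map (fun c => c.toNat)).flatMap pvByteHex) = (S : Int) := by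
    rw [pvSumPairs_flatMap _ 0 (by
      intro b hb
      rcases List.mem_map.mp hb with ⟨c, hc, rfl⟩
      exact hall c hc), zero_add]
  rw [hsum]
  congr 1
  -- both checksum strings are equal
  have hr : S % 256 < 256 := by omega
  have hmodS : PySem.Int.mod (S : Int) 256 = ((S % 256 : Nat) : Int) := by
    rw [PySem.Int.mod_eq_emod_of_pos (by norm_num)]
    push_cast
    omega
  rw [hmodS]
  have := pvTail_eq ⟨S % 256, hr⟩
  rw [this]
  congr 1
  rw [PySem.Int.mod_eq_emod_of_pos (by norm_num), PySem.Int.mod_eq_emod_of_pos (by norm_num)]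
  push_cast
  omega
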